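-- pv_equiv track=rewrite | github.com/The-SSky/homework02 | part2/question5.py | emulate
-- ===== SOURCE A (Python) =====
-- def emulate(limit):
--     """
--     Длина вектора равна введенному числу
--     """
--     result = list()
--     current_number = 1
--     total = 0
--     while total < limit:
--         for _ in range(1, current_number + 1):
--             if total == limit: break
--             result.append(current_number)
--             total += 1
--         current_number += 1
--     return result
-- ===== SOURCE B (Python) =====
-- def emulate(limit):
--     def isqrt(n):
--         # Newton's method for the integer square root (exact, no floats)
--         if n <= 1:
--             return n
--         guess = n // 2
--         while True:
--             nxt = (guess + n // guess) // 2
--             if nxt >= guess: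
--                 return guess
--             guess = nxt
--     # position i (0-indexed) holds the smallest k with k*(k+1)/2 >= i+1,
--     # i.e. k = (isqrt(8*i+1)+1)//2
--     return [(isqrt(8 * i + 1) + 1) // 2 for i in range(limit)]
-- ===== Notes on version B (the rewrite author's own statement) =====
-- stated objective: alternative
-- what changed: Replaces A's nested block-counting loops by a single flat pass: each position i gets its value from the closed-form triangular-number inverse k = (isqrt(8*i+1)+1)//2, with an exact Newton integer square root.
import Mathlib
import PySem

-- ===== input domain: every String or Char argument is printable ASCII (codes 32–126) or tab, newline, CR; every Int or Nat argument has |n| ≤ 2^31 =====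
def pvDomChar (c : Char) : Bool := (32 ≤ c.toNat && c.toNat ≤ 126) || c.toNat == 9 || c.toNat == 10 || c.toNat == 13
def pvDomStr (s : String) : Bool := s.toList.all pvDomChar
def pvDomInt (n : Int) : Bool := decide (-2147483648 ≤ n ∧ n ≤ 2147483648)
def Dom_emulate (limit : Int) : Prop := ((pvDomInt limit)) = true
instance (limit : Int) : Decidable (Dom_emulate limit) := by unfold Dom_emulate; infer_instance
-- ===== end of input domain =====

-- B replaces A's nested block-counting loops by one flat pass computing each position's
-- value from the closed-form triangular-number inverse (Newton integer sqrt); equal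
-- return values for every Int limit ('alternative': different algorithm, similar cost).

-- ===== PORT A =====
-- inner 'for _ in range(1, current_number+1)' loop: n iterations (n = current_number.toNat),
-- with the 'if total == limit: break' check; returns (result, total)
def pvInnerA (limit c : Int) : Nat → Int → List Int → List Int × Int
  | 0, total, result => (result, total)
  | Nat.succ m, total, result =>
      if total = limit then (result, total)
      else pvInnerA limit c m (total + 1) (result ++ [c])

-- outer 'while total < limit' loop; fuel only makes the recursion total
-- (fuel limit.toNat + 1 is always enough: each pass with current ≥ 1 adds ≥ 1 element)
def pvOuterA (limit : Int) : Nat → Int → Int → List Int → List Int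
  | 0, _, _, result => result
  | Nat.succ fuel, current, total, result =>
      if total < limit then
        let p := pvInnerA limit current current.toNat total result
        pvOuterA limit fuel (current + 1) p.2 p.1
      else result

def emulate (limit : Int) : List Int := pvOuterA limit (limit.toNat + 1) 1 0 []

-- ===== PORT B =====
-- isqrt's 'while True' Newton iteration: compute nxt, return guess if nxt >= guess,
-- else continue with nxt; fuel only makes the recursion total (guess strictly
-- decreases, so fuel = guess0 + 1 is always enough)
def pvNewtonB (n : Int) : Nat → Int → Int
  | 0, guess => guess
  | Nat.succ fuel, guess =>
      let nxt := PySem.Int.floordiv (guess + PySem.Int.floordiv n guess) 2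
      if guess ≤ nxt then guess else pvNewtonB n fuel nxt

-- def isqrt(n): if n <= 1: return n; guess = n // 2; <Newton loop>
def pvIsqrtB (n : Int) : Int :=
  if n ≤ 1 then n
  else pvNewtonB n ((PySem.Int.floordiv n 2).toNat + 1) (PySem.Int.floordiv n 2)

-- [(isqrt(8*i+1)+1)//2 for i in range(limit)]
def emulate_alt (limit : Int) : List Int :=
  (PySem.List.pyRange 0 limit 1).map
    (fun i => PySem.Int.floordiv (pvIsqrtB (8 * i + 1) + 1) 2)

-- ===== PRECONDITION & SPEC =====
def Spec_emulate (limit : Int) (out : List Int) : Prop := out = emulate_alt limit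
instance (limit : Int) (out : List Int) : Decidable (Spec_emulate limit out) := by unfold Spec_emulate; infer_instance

-- ===== CLAIM (what is proved, stated in full; the proofs are below) =====
def Claim_equal_emulate : Prop := ∀ (limit : Int), Dom_emulate limit → Spec_emulate limit (emulate limit)

-- ===== LEMMAS AND PROOFS =====

-- the value B computes at (0-indexed) position i, over Nat
def pvF (i : Nat) : Int := ((Nat.sqrt (8 * i + 1) + 1) / 2 : Nat)

-- triangular numbers
def pvTri : Nat → Nat
  | 0 => 0
  | Nat.succ k => pvTri k + (k + 1)

theorem pvTri_eq (k : Nat) : 2 * pvTri k = k * (k + 1) := by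
  induction k with
  | zero => rfl
  | succ m ih => simp only [pvTri]; nlinarith

-- floordiv of nonnegative casts is Nat division
theorem pvFloordiv_cast (a b : Nat) (hb : 0 < b) :
    PySem.Int.floordiv (a : Int) (b : Int) = ((a / b : Nat) : Int) := by
  rw [PySem.Int.floordiv_eq_ediv_of_pos (by exact_mod_cast hb)]
  rw [Int.natCast_div]

-- Newton loop correctness: starting at any guess above the true root it returns Nat.sqrt n
theorem pvNewton_eq (n : Nat) (hn : 2 ≤ n) :
    ∀ (fuel : Nat) (g : Nat), 1 ≤ g → Nat.sqrt n ≤ g → g < fuel →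
    pvNewtonB (n : Int) fuel (g : Int) = (Nat.sqrt n : Int) := by
  intro fuel
  induction fuel with
  | zero => intro g _ _ h; omega
  | succ f ih =>
    intro g hg1 hgs hgf
    have hs1 : 1 ≤ Nat.sqrt n := by
      rw [Nat.le_sqrt]; omega
    have hss : Nat.sqrt n * Nat.sqrt n ≤ n := Nat.sqrt_le n
    rw [pvNewtonB]
    have hdiv : PySem.Int.floordiv (n : Int) (g : Int) = ((n / g : Nat) : Int) :=
      pvFloordiv_cast n g hg1
    have hdiv2 : PySem.Int.floordiv ((g : Int) + ((n / g : Nat) : Int)) 2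
        = (((g + n / g) / 2 : Nat) : Int) := by
      have := pvFloordiv_cast (g + n / g) 2 (by omega)
      rw [← this]; push_cast; ring_nf
    simp only [hdiv, hdiv2]
    set m : Nat := (g + n / g) / 2 with hm
    -- the next guess never drops below the true root (AM–GM)
    have hnext : Nat.sqrt n ≤ m := by
      rw [hm, Nat.le_div_iff_mul_le (by omega : 0 < 2)]
      have hdg : 0 ≤ n / g := Nat.zero_le _
      by_cases hc : 2 * Nat.sqrt n ≤ g
      · omega
      · have h1 : (2 * Nat.sqrt n - g) ≤ n / g := by
          rw [Nat.le_div_iff_mul_le hg1]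
          zify [show g ≤ 2 * Nat.sqrt n from by omega]
          have hcs : ((Nat.sqrt n : Int)) * Nat.sqrt n ≤ (n : Int) := by exact_mod_cast hss
          nlinarith [sq_nonneg ((Nat.sqrt n : Int) - g)]
        omega
    by_cases hstop : (g : Int) ≤ (m : Int)
    · -- exit: g ≤ (g + n/g)/2 forces g*g ≤ n, so g = sqrt n
      rw [if_pos hstop]
      have hgm : g ≤ m := by exact_mod_cast hstop
      have : g ≤ n / g := by
        rw [hm, Nat.le_div_iff_mul_le (by omega : 0 < 2)] at hgm
        omega
      have : g * g ≤ n := (Nat.le_div_iff_mul_le hg1).mp this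
      have hle : g ≤ Nat.sqrt n := Nat.le_sqrt.mpr this
      have heq : Nat.sqrt n = g := le_antisymm hgs hle
      exact_mod_cast heq.symm
    · rw [if_neg hstop]
      have hmg : m < g := by
        have : ¬ (g ≤ m) := fun h => hstop (by exact_mod_cast h)
        omega
      exact ih m (by omega) hnext (by omega)

-- the ported isqrt is Nat.sqrt on every natural input
theorem pvIsqrtB_eq (n : Nat) : pvIsqrtB (n : Int) = (Nat.sqrt n : Int) := by
  by_cases h : n ≤ 1
  · interval_cases n <;> decide
  · have hn : 2 ≤ n := by omega
    rw [pvIsqrtB, if_neg (by exact_mod_cast h)]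
    have h2 : PySem.Int.floordiv (n : Int) 2 = ((n / 2 : Nat) : Int) := by
      exact_mod_cast pvFloordiv_cast n 2 Nat.zero_lt_two
    rw [h2]
    have hg1 : 1 ≤ n / 2 := by omega
    have hgs : Nat.sqrt n ≤ n / 2 := by
      rw [Nat.le_div_iff_mul_le (by omega : 0 < 2)]
      have hs1 : 1 ≤ Nat.sqrt n := by rw [Nat.le_sqrt]; omega
      have hss : Nat.sqrt n * Nat.sqrt n ≤ n := Nat.sqrt_le n
      nlinarith
    have : (((n / 2 : Nat) : Int)).toNat = n / 2 := by omega
    rw [this]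
    exact pvNewton_eq n hn (n / 2 + 1) (n / 2) hg1 hgs (by omega)

-- triangular-number inverse: inside the k-th block, pvF gives k
theorem pvF_block (k i : Nat) (hk : 1 ≤ k) (h1 : pvTri (k - 1) ≤ i) (h2 : i < pvTri k) :
    pvF i = (k : Int) := by
  have e1 : 2 * pvTri (k - 1) = (k - 1) * k := by
    have h := pvTri_eq (k - 1)
    rwa [show k - 1 + 1 = k from by omega] at h
  have e2 : 2 * pvTri k = k * (k + 1) := pvTri_eq k
  have lo : (2 * k - 1) * (2 * k - 1) ≤ 8 * i + 1 := by
    have h1' : (k - 1) * k ≤ 2 * i := by omega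
    zify [show 1 ≤ k from hk, show 1 ≤ 2 * k from by omega] at h1' ⊢
    nlinarith
  have hi : (2 * k - 1) ≤ Nat.sqrt (8 * i + 1) := Nat.le_sqrt.mpr lo
  have hup : 8 * i + 1 < (2 * k + 1) * (2 * k + 1) := by
    have h2' : 2 * i + 2 ≤ k * (k + 1) := by omega
    nlinarith
  have hs : Nat.sqrt (8 * i + 1) < 2 * k + 1 := Nat.sqrt_lt.mpr hup
  unfold pvF
  have : (Nat.sqrt (8 * i + 1) + 1) / 2 = k := by omega
  rw [this]

-- A's inner loop appends min n (limit - total) copies of c and advances total by that much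
theorem pvInnerA_eq (limit c : Int) (n : Nat) (total : Int) (result : List Int)
    (h : total ≤ limit) :
    pvInnerA limit c n total result =
      (result ++ List.replicate (min n (limit - total).toNat) c,
       total + min n (limit - total).toNat) := by
  induction n generalizing total result with
  | zero => simp [pvInnerA]
  | succ m ih =>
    by_cases he : total = limit
    · subst he
      simp [pvInnerA]
    · have hlt : total < limit := lt_of_le_of_ne h he
      have h1 : total + 1 ≤ limit := by omega
      rw [pvInnerA, if_neg he, ih (total + 1) (result ++ [c]) h1]
      have hmin : min (m + 1) (limit - total).toNat = min m (limit - total - 1).toNat + 1 := by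
        omega
      rw [Prod.mk.injEq]
      constructor
      · rw [hmin, List.append_assoc]
        congr 1
        have : limit - (total + 1) = limit - total - 1 := by ring
        rw [this]
        rw [List.replicate_succ]
        rfl
      · have : limit - (total + 1) = limit - total - 1 := by ring
        rw [this]
        push_cast
        omega

-- A's outer loop, entered with total = min (pvTri (k-1)) L, produces the map of pvF
-- over the remaining positions
theorem pvOuterA_spec (L : Nat) :
    ∀ (fuel k t : Nat) (r : List Int), 1 ≤ k → min (pvTri (k - 1)) L = t →
    L ≤ t + fuel →
    pvOuterA (L : Int) fuel (k : Int) (t : Int) r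
      = r ++ (List.range' t (L - t)).map pvF := by
  intro fuel
  induction fuel with
  | zero =>
    intro k t r _ hmin hfuel
    have ht : t = L := by omega
    subst ht
    simp [pvOuterA]
  | succ fuel ih =>
    intro k t r hk hmin hfuel
    by_cases htL : t < L
    · have ht : t = pvTri (k - 1) := by omega
      rw [pvOuterA, if_pos (by exact_mod_cast htL)]
      have htoNat : ((k : Int)).toNat = k := by omega
      rw [htoNat]
      rw [pvInnerA_eq (L : Int) (k : Int) k (t : Int) r (by exact_mod_cast le_of_lt htL)]
      have hsub : (((L : Int) - (t : Int))).toNat = L - t := by omega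
      rw [hsub]
      set m : Nat := min k (L - t) with hm
      have hm1 : 1 ≤ m := by omega
      have htri : pvTri k = pvTri (k - 1) + k := by
        cases k with
        | zero => omega
        | succ p => simp [pvTri]
      have hcast1 : (k : Int) + 1 = ((k + 1 : Nat) : Int) := by push_cast; ring
      have hcast2 : (t : Int) + (m : Int) = ((t + m : Nat) : Int) := by push_cast; ring
      simp only [hcast1, hcast2]
      have hinv : min (pvTri (k + 1 - 1)) L = t + m := by
        simp only [Nat.add_sub_cancel]
        omega
      rw [ih (k + 1) (t + m) _ (by omega) hinv (by omega)]
      -- the freshly appended block is exactly the map of pvF over its positions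
      have hblock : List.replicate m (k : Int) = (List.range' t m).map pvF := by
        apply (List.eq_replicate_iff.mpr ?_).symm
        constructor
        · simp
        · intro b hb
          obtain ⟨i, hi, rfl⟩ := List.mem_map.mp hb
          have := List.mem_range'_1.mp hi
          exact pvF_block k i hk (by omega) (by omega)
      have hr : List.range' t m ++ List.range' (t + m) (L - (t + m))
          = List.range' t (L - t) := by
        have h : List.range' t m ++ List.range' (t + 1 * m) (L - (t + m))
            = List.range' t (m + (L - (t + m))) := List.range'_append
        rw [one_mul] at h
        rw [h]
        congr 1
        omega
      rw [hblock, List.append_assoc, ← List.map_append, hr]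
    · have ht : t = L := by omega
      subst ht
      rw [pvOuterA, if_neg (by exact_mod_cast htL)]
      simp

-- B's per-element formula agrees with pvF on natural indices
theorem pvAltElem (j : Nat) :
    PySem.Int.floordiv (pvIsqrtB (8 * (j : Int) + 1) + 1) 2 = pvF j := by
  have h8 : (8 : Int) * (j : Int) + 1 = ((8 * j + 1 : Nat) : Int) := by push_cast; ring
  rw [h8, pvIsqrtB_eq (8 * j + 1)]
  have : (Nat.sqrt (8 * j + 1) : Int) + 1 = ((Nat.sqrt (8 * j + 1) + 1 : Nat) : Int) := by
    push_cast; ring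
  rw [this]
  have h2 : PySem.Int.floordiv ((Nat.sqrt (8 * j + 1) + 1 : Nat) : Int) 2
      = (((Nat.sqrt (8 * j + 1) + 1) / 2 : Nat) : Int) := by
    exact_mod_cast pvFloordiv_cast (Nat.sqrt (8 * j + 1) + 1) 2 Nat.zero_lt_two
  rw [h2]
  rfl

-- ===== VERDICT (by name: the statement is the Claim_ definition above) =====
theorem emulate_spec : Claim_equal_emulate := by
  intro limit _
  unfold Spec_emulate emulate emulate_alt
  by_cases h : 0 ≤ limit
  · obtain ⟨L, rfl⟩ : ∃ L : Nat, limit = (L : Int) := ⟨limit.toNat, by omega⟩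
    have htoNat : ((L : Int)).toNat = L := by omega
    rw [htoNat]
    have hA := pvOuterA_spec L (L + 1) 1 0 [] (by omega) (by simp [pvTri]) (by omega)
    norm_num at hA
    rw [hA]
    rw [PySem.List.pyRange_one 0 (L : Int)]
    have hsub : (((L : Int) - 0)).toNat = L := by omega
    rw [hsub, List.map_map, List.range_eq_range']
    apply List.map_congr_left
    intro j _
    simpa using (pvAltElem j).symm
  · -- limit < 0: both sides are []
    have h1 : ¬ ((0 : Int) < limit) := by omega
    simp only [Int.toNat_of_nonpos (by omega : limit ≤ 0)]
    rw [pvOuterA, if_neg (by simpa using h1)]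
    rw [PySem.List.pyRange_one_eq_nil (by omega : limit ≤ 0), List.map_nil]
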